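-- pv_equiv track=rewrite | github.com/AlexDovgalenko/T3l3_weather_bot | wind_direction_emoji.py | get_wind_direction_emoji
-- ===== SOURCE A (Python) =====
-- WIND_DIRECTION_EMOJI = {
--     "\U00002B06": [(338, 360), (0, 23)],
--     "\U00002197": [(23, 68)],
--     "\U000027A1": [(68, 113)],
--     "\U00002198": [(113, 158)],
--     "\U00002B07": [(158, 203)],
--     "\U00002199": [(203, 248)],
--     "\U00002B05": [(248, 293)],
--     "\U00002196": [(293, 338)]
-- }
--
-- def check_presense(wind_direction, degree_range):
--     if wind_direction in range(*degree_range):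
--         return True
--     return False
--
-- def get_wind_direction_emoji(wind_direction):
--     if wind_direction is None:
--         return "\U0000262F"
--     for key, value in WIND_DIRECTION_EMOJI.items():
--         result = []
--         for item in value:
--             result.append(check_presense(wind_direction=wind_direction, degree_range=item))
--         if any(result):
--             return key
--     return "\U0000262F"
-- ===== SOURCE B (Python) =====
-- _KEYS = ["\U00002B06", "\U00002197", "\U000027A1", "\U00002198",
--          "\U00002B07", "\U00002199", "\U00002B05", "\U00002196"]
--
-- def get_wind_direction_emoji(wind_direction):
--     if wind_direction is None or not (0 <= wind_direction < 360):
--         return "\U0000262F"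
--     return _KEYS[((wind_direction + 22) // 45) % 8]
-- ===== Notes on version B (the rewrite author's own statement) =====
-- stated objective: simpler
-- what changed: Replaces the scan over the emoji->degree-ranges dict (with a per-key list of range-membership tests) by a direct sector computation keys[((v+22)//45)%8] behind a single 0<=v<360 guard.
import Mathlib
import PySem

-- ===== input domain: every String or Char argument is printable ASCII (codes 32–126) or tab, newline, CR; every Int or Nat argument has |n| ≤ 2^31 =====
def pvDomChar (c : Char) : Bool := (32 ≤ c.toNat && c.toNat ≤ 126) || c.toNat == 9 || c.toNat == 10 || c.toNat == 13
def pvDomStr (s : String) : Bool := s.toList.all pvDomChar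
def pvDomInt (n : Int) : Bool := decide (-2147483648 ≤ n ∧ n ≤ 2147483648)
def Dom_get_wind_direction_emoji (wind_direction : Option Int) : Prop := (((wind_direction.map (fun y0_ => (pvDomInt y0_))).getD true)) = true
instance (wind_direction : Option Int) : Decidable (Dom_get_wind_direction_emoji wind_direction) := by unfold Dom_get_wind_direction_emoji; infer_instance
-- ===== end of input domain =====

set_option maxHeartbeats 1000000


-- B replaces A's scan over the emoji→ranges dict by a direct sector computation
-- keys[((v+22)//45) % 8] after a single in-[0,360) guard (objective: simpler).

-- ===== PORT A =====
-- the module constant WIND_DIRECTION_EMOJI as an association list (dict insertion order)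
def WIND_DIRECTION_EMOJI : List (String × List (Int × Int)) :=
  [("\u2B06", [(338, 360), (0, 23)]),
   ("\u2197", [(23, 68)]),
   ("\u27A1", [(68, 113)]),
   ("\u2198", [(113, 158)]),
   ("\u2B07", [(158, 203)]),
   ("\u2199", [(203, 248)]),
   ("\u2B05", [(248, 293)]),
   ("\u2196", [(293, 338)])]

-- `wind_direction in range(a, b)` for an int is exactly a ≤ wd < b (step 1)
def check_presense (wind_direction : Int) (degree_range : Int × Int) : Bool :=
  if degree_range.1 ≤ wind_direction ∧ wind_direction < degree_range.2 then true else false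

-- the `for key, value in … .items()` loop: first key whose range list hits, else the star
def get_wind_direction_emoji_loop (wind_direction : Int) :
    List (String × List (Int × Int)) → String
  | [] => "\u262F"
  | (key, value) :: rest =>
      if (value.map (fun item => check_presense wind_direction item)).any id then key
      else get_wind_direction_emoji_loop wind_direction rest

def get_wind_direction_emoji (wind_direction : Option Int) : String :=
  match wind_direction with
  | none => "\u262F"
  | some wd => get_wind_direction_emoji_loop wd WIND_DIRECTION_EMOJI

-- ===== PORT B =====
def pvKeys : List String :=
  ["\u2B06", "\u2197", "\u27A1", "\u2198", "\u2B07", "\u2199", "\u2B05", "\u2196"]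

def get_wind_direction_emoji_alt (wind_direction : Option Int) : String :=
  match wind_direction with
  | none => "\u262F"
  | some wd =>
      if 0 ≤ wd ∧ wd < 360 then
        -- _KEYS[((wd + 22) // 45) % 8]; the index is provably in [0, 8)
        PySem.List.pyGetD pvKeys (PySem.Int.mod (PySem.Int.floordiv (wd + 22) 45) 8) "\u262F"
      else "\u262F"

-- ===== PRECONDITION & SPEC =====
def Spec_get_wind_direction_emoji (wind_direction : Option Int) (out : String) : Prop := out = get_wind_direction_emoji_alt wind_direction
instance (wind_direction : Option Int) (out : String) : Decidable (Spec_get_wind_direction_emoji wind_direction out) := by unfold Spec_get_wind_direction_emoji; infer_instance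

-- ===== CLAIM (what is proved, stated in full; the proofs are below) =====
def Claim_equal_get_wind_direction_emoji : Prop := ∀ (wind_direction : Option Int), Dom_get_wind_direction_emoji wind_direction → Spec_get_wind_direction_emoji wind_direction (get_wind_direction_emoji wind_direction)

-- ===== LEMMAS AND PROOFS =====

theorem pv_some_case (wd : Int) :
    get_wind_direction_emoji_loop wd WIND_DIRECTION_EMOJI =
      get_wind_direction_emoji_alt (some wd) := by
  have hc : ∀ a b : Int, check_presense wd (a, b) = decide (a ≤ wd ∧ wd < b) := by
    intro a b; unfold check_presense; split_ifs with h <;> simp [h]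
  by_cases h0 : 0 ≤ wd ∧ wd < 360
  · simp only [get_wind_direction_emoji_alt, if_pos h0,
      PySem.Int.floordiv_eq_ediv_of_pos (by norm_num : (0:Int) < 45),
      PySem.Int.mod_eq_emod_of_pos (by norm_num : (0:Int) < 8)]
    simp only [WIND_DIRECTION_EMOJI, get_wind_direction_emoji_loop, List.map, List.any_cons,
      List.any_nil, id_eq, hc, Bool.or_false, Bool.or_eq_true, decide_eq_true_eq]
    have hl : 0 ≤ (wd + 22) / 45 := by omega
    have hu : (wd + 22) / 45 ≤ 8 := by omega
    set q : Int := (wd + 22) / 45 with hqdef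
    interval_cases q <;> split_ifs <;> first | rfl | omega
  · simp only [get_wind_direction_emoji_alt, if_neg h0]
    simp only [WIND_DIRECTION_EMOJI, get_wind_direction_emoji_loop, List.map, List.any_cons,
      List.any_nil, id_eq, hc, Bool.or_false, Bool.or_eq_true, decide_eq_true_eq]
    split_ifs <;> first | rfl | omega

-- ===== VERDICT (by name: the statement is the Claim_ definition above) =====
theorem get_wind_direction_emoji_spec : Claim_equal_get_wind_direction_emoji := by
  intro wd _
  unfold Spec_get_wind_direction_emoji
  cases wd with
  | none => rfl
  | some v => exact pv_some_case v
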